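-- pv_equiv track=rewrite | github.com/BinaryBard996/AbilityHelperSample | Plugins/AbilityEditorHelper/Content/Python/ability_editor_excel_tool.py | _to_tag_container_obj
-- ===== SOURCE A (Python) =====
-- def _compute_parent_tags(tag: str) -> list:
--     # GameplayCue.Test.A -> ["GameplayCue", "GameplayCue.Test"]
--     parts = tag.split(".")
--     if len(parts) <= 1:
--         return []
--     parents = []
--     for i in range(1, len(parts)):
--         parents.append(".".join(parts[:i]))
--     return parents
--
-- def _to_tag_container_obj(tag_list: list) -> dict:
--     gameplay_tags = [{"TagName": t} for t in tag_list]
--     parent_set = set()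
--     for t in tag_list:
--         for p in _compute_parent_tags(t):
--             parent_set.add(p)
--     parent_tags = [{"TagName": p} for p in sorted(parent_set)]
--     return {"GameplayTags": gameplay_tags, "ParentTags": parent_tags}
-- ===== SOURCE B (Python) =====
-- def _to_tag_container_obj(tag_list: list) -> dict:
--     parent_set = set()
--     for t in tag_list:
--         parts = t.split(".")
--         if len(parts) > 1:
--             prefix = parts[0]
--             parent_set.add(prefix)
--             for part in parts[1:-1]:
--                 prefix += "." + part
--                 parent_set.add(prefix)
--     return {
--         "GameplayTags": [{"TagName": t} for t in tag_list],
--         "ParentTags": [{"TagName": p} for p in sorted(parent_set)],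
--     }
-- ===== Notes on version B (the rewrite author's own statement) =====
-- stated objective: alternative
-- what changed: The _compute_parent_tags helper (slice-and-join of parts[:i] for every i) is removed: B inlines the parent computation and builds each parent with a single running string prefix extended segment by segment, adding each growing prefix to the set directly.
import Mathlib
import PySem

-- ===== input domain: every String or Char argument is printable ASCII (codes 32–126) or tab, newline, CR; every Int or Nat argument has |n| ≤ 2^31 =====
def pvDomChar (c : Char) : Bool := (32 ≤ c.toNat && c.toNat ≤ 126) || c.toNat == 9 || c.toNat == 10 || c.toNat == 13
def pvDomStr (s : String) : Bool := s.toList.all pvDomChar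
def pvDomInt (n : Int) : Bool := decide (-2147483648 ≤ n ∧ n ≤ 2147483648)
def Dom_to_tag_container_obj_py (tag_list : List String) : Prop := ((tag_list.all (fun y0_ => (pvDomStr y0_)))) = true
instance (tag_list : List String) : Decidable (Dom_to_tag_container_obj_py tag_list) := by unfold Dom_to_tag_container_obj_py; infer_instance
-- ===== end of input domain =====

-- B inlines the parent computation: instead of re-joining a fresh slice parts[:i] for every i,
-- it threads one running prefix string and adds each growing prefix to the set (alternative decomposition).


-- ===== PORT A =====
-- t.split(".") : the separator "." is nonempty, so PySem.Str.split? always returns `some`; `.getD []` is exact.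
def compute_parent_tags (tag : String) : List String :=
  let parts := (PySem.Str.split? tag ".").getD []
  if parts.length ≤ 1 then []
  else
    (PySem.List.pyRange 1 (parts.length : Int)).foldl
      (fun parents i => parents ++ [PySem.Str.join "." (PySem.List.slice parts none (some i))]) []

def to_tag_container_obj_py (tag_list : List String) : List (String × List (List (String × String))) :=
  let gameplay_tags := tag_list.map (fun t => [("TagName", t)])
  let parent_set := tag_list.foldl
    (fun (s : PySem.Set String) t => (compute_parent_tags t).foldl PySem.Set.add s) PySem.Set.empty
  let parent_tags := (PySem.List.sorted parent_set (fun p => p) false).map (fun p => [("TagName", p)])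
  [("GameplayTags", gameplay_tags), ("ParentTags", parent_tags)]

-- ===== PORT B =====
def to_tag_container_obj_py_alt (tag_list : List String) : List (String × List (List (String × String))) :=
  let parent_set := tag_list.foldl
    (fun (s : PySem.Set String) t =>
      match (PySem.Str.split? t ".").getD [] with
      | [] => s
      | p0 :: rest =>
        if rest.length = 0 then s
        else
          ((rest.dropLast).foldl
            (fun (st : String × PySem.Set String) part =>
              (st.1 ++ "." ++ part, PySem.Set.add st.2 (st.1 ++ "." ++ part)))
            (p0, PySem.Set.add s p0)).2)
    PySem.Set.empty
  [("GameplayTags", tag_list.map (fun t => [("TagName", t)])),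
   ("ParentTags", (PySem.List.sorted parent_set (fun p => p) false).map (fun p => [("TagName", p)]))]

-- ===== PRECONDITION & SPEC =====
def Spec_to_tag_container_obj_py (tag_list : List String) (out : List (String × List (List (String × String)))) : Prop := out = to_tag_container_obj_py_alt tag_list
instance (tag_list : List String) (out : List (String × List (List (String × String)))) : Decidable (Spec_to_tag_container_obj_py tag_list out) := by unfold Spec_to_tag_container_obj_py; infer_instance

-- ===== CLAIM (what is proved, stated in full; the proofs are below) =====
def Claim_equal_to_tag_container_obj_py : Prop := ∀ (tag_list : List String), Dom_to_tag_container_obj_py tag_list → Spec_to_tag_container_obj_py tag_list (to_tag_container_obj_py tag_list)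

-- ===== LEMMAS AND PROOFS =====

-- the sequence of growing prefixes B builds from `pre` over the middle segments
def growList (pre : String) : List String → List String
  | [] => []
  | m :: ms => (pre ++ "." ++ m) :: growList (pre ++ "." ++ m) ms

-- merging the first two pieces into one does not change a "."-join
lemma join_merge (a b : String) (l : List String) :
    PySem.Str.join "." (a :: b :: l) = PySem.Str.join "." ((a ++ "." ++ b) :: l) := by
  cases l with
  | nil =>
    simp [PySem.Str.join, PySem.Chars.join_cons_cons, PySem.Chars.join_singleton, String.toList_append]
  | cons c cs =>
    simp [PySem.Str.join, PySem.Chars.join_cons_cons, String.toList_append]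

lemma join_one (a : String) : PySem.Str.join "." [a] = a := by
  simp [PySem.Str.join, PySem.Chars.join_singleton, String.ofList_toList]

lemma join_pair (a b : String) : PySem.Str.join "." [a, b] = a ++ "." ++ b := by
  rw [join_merge, join_one]

-- B's prefix sequence, characterised as the "."-joins of the prefixes of pre :: mid
lemma growList_eq (mid : List String) : ∀ pre : String,
    growList pre mid
      = (List.range' 1 mid.length).map (fun i => PySem.Str.join "." ((pre :: mid).take (i+1))) := by
  induction mid with
  | nil => intro pre; rfl
  | cons m ms ih =>
    intro pre
    simp only [growList, List.length_cons, List.range'_succ, List.map_cons]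
    refine congrArg₂ _ ?_ ?_
    · simp [List.take, join_pair]
    · rw [ih (pre ++ "." ++ m)]
      rw [List.range'_eq_map_range, List.range'_eq_map_range, List.map_map, List.map_map]
      refine List.map_congr_left ?_
      intro i _
      simp only [Function.comp]
      have : (1 + 1 + i + 1) = (1 + i + 1) + 1 := by omega
      rw [this]
      simp only [List.take_succ_cons]
      rw [join_merge]

lemma pyRange_one_natCast (n : Nat) :
    PySem.List.pyRange 1 ((n : Int)) = (List.range' 1 (n - 1)).map (fun k => ((k : Nat) : Int)) := by
  induction n with
  | zero => decide
  | succ m ih =>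
    cases m with
    | zero => decide
    | succ m' =>
      have h1 : (1:Int) ≤ ((m'+1 : Nat) : Int) := by push_cast; omega
      have : ((m' + 1 + 1 : Nat) : Int) = ((m'+1 : Nat) : Int) + 1 := by push_cast; ring
      rw [this, PySem.List.pyRange_one_succ_right h1, ih]
      have h2 : (m' + 1 + 1) - 1 = (m' + 1 - 1) + 1 := by omega
      rw [h2, List.range'_concat]
      simp
      omega

-- A's per-tag parent list equals p0 followed by B's growing-prefix sequence
lemma parents_eq (p0 r : String) (rs : List String) :
    (PySem.List.pyRange 1 (((p0 :: r :: rs).length : Nat) : Int)).foldl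
      (fun parents i => parents ++ [PySem.Str.join "." (PySem.List.slice (p0 :: r :: rs) none (some i))]) []
    = p0 :: growList p0 ((r :: rs).dropLast) := by
  rw [PySem.List.foldl_append_singleton_eq_map, pyRange_one_natCast, List.map_map]
  have hlen : (p0 :: r :: rs).length - 1 = rs.length + 1 := by simp
  rw [hlen, List.range'_succ, List.map_cons]
  simp only [List.nil_append]
  refine congrArg₂ _ ?_ ?_
  · simp only [Function.comp]
    rw [PySem.List.slice_to_natCast]
    simp [join_one]
  · rw [growList_eq]
    have hml : ((r :: rs).dropLast).length = rs.length := by simp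
    rw [hml, List.range'_eq_map_range, List.range'_eq_map_range, List.map_map, List.map_map]
    refine List.map_congr_left ?_
    intro i hi
    simp only [Function.comp, PySem.List.slice_to_natCast]
    have hd : p0 :: (r :: rs).dropLast = (p0 :: r :: rs).dropLast := by simp
    rw [hd, List.dropLast_eq_take, List.take_take]
    have hmem := List.mem_range.mp hi
    have : min (1 + i + 1) ((p0 :: r :: rs).length - 1) = 1 + i + 1 := by
      simp only [List.length_cons]; omega
    rw [this]
    have : (1 + 1 + i) = (1 + i + 1) := by omega
    rw [this]

-- B's inner fold adds exactly growList pre mid, in order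
lemma bfold (mid : List String) : ∀ (pre : String) (s : PySem.Set String),
    (mid.foldl
      (fun (st : String × PySem.Set String) part =>
        (st.1 ++ "." ++ part, PySem.Set.add st.2 (st.1 ++ "." ++ part)))
      (pre, s)).2
    = (growList pre mid).foldl PySem.Set.add s := by
  induction mid with
  | nil => intro pre s; rfl
  | cons m ms ih => intro pre s; simp only [List.foldl_cons, growList]; exact ih _ _

-- per tag, B's set step equals folding Set.add over A's parent list
lemma step_eq (t : String) (s : PySem.Set String) :
    (match (PySem.Str.split? t ".").getD [] with
      | [] => s
      | p0 :: rest =>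
        if rest.length = 0 then s
        else
          ((rest.dropLast).foldl
            (fun (st : String × PySem.Set String) part =>
              (st.1 ++ "." ++ part, PySem.Set.add st.2 (st.1 ++ "." ++ part)))
            (p0, PySem.Set.add s p0)).2)
    = (compute_parent_tags t).foldl PySem.Set.add s := by
  unfold compute_parent_tags
  rcases h : (PySem.Str.split? t ".").getD [] with _ | ⟨p0, _ | ⟨r, rs⟩⟩
  · simp
  · simp
  · simp only [List.length_cons]
    rw [if_neg (by simp), if_neg (by omega)]
    have hc : ((rs.length + 1 + 1 : Nat) : Int) = (((p0 :: r :: rs).length : Nat) : Int) := by simp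
    rw [bfold, hc, parents_eq, List.foldl_cons]

-- ===== VERDICT (by name: the statement is the Claim_ definition above) =====
theorem to_tag_container_obj_py_spec : Claim_equal_to_tag_container_obj_py := by
  intro tag_list _
  unfold Spec_to_tag_container_obj_py
  simp only [to_tag_container_obj_py, to_tag_container_obj_py_alt]
  have h : tag_list.foldl
      (fun (s : PySem.Set String) t =>
        match (PySem.Str.split? t ".").getD [] with
        | [] => s
        | p0 :: rest =>
          if rest.length = 0 then s
          else
            ((rest.dropLast).foldl
              (fun (st : String × PySem.Set String) part =>
                (st.1 ++ "." ++ part, PySem.Set.add st.2 (st.1 ++ "." ++ part)))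
              (p0, PySem.Set.add s p0)).2)
      PySem.Set.empty
    = tag_list.foldl
      (fun (s : PySem.Set String) t => (compute_parent_tags t).foldl PySem.Set.add s) PySem.Set.empty :=
    PySem.List.foldl_congr_mem tag_list _ _ _ (fun acc x _ => step_eq x acc)
  rw [h]
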